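-- pv_equiv track=rewrite | github.com/1droozd1/MAI_Labs | 4_course/contest/17_11/test.py | complete_itinerary
-- ===== SOURCE A (Python) =====
-- def complete_itinerary(n, itinerary):
--     all_stations = set(range(1, n + 1))
--     given_stations = set(itinerary) - {0}
--     missing_stations = sorted(all_stations - given_stations, reverse=True)
--
--     if len(missing_stations) != itinerary.count(0):
--         return "*"
--
--     filled_itinerary = []
--     missing_index = 0
--
--     for station in itinerary:
--         if station == 0:
--             filled_itinerary.append(missing_stations[missing_index])
--             missing_index += 1
--         else:
--             filled_itinerary.append(station)
--
--     # Проверка корректности маршрута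
--     max_station = max(filled_itinerary)
--     peak_index = filled_itinerary.index(max_station)
--
--     # Сценарий 1: Восхождение до максимума, затем спуск
--     if (filled_itinerary[:peak_index] == sorted(filled_itinerary[:peak_index]) and
--         filled_itinerary[peak_index:] == sorted(filled_itinerary[peak_index:], reverse=True)):
--         return " ".join(map(str, filled_itinerary))
--
--     # Сценарий 2: Постоянный спуск
--     if filled_itinerary == sorted(filled_itinerary, reverse=True):
--         return " ".join(map(str, filled_itinerary))
--
--     filled_itinerary = []
--     missing_index = 0
--     missing_stations_ver_2 = missing_stations[::-1]
--
--     for station in itinerary: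
--         if station == 0:
--             filled_itinerary.append(missing_stations_ver_2[missing_index])
--             missing_index += 1
--         else:
--             filled_itinerary.append(station)
--
--     # Сценарий 3: Постоянный подъем
--     if filled_itinerary == sorted(filled_itinerary):
--         return " ".join(map(str, filled_itinerary))
--
--     return "*"
-- ===== SOURCE B (Python) =====
-- def complete_itinerary(n, itinerary):
--     # Missing stations, ascending; guard on the number of gaps.
--     missing = sorted(set(range(1, n + 1)) - set(itinerary))
--     if len(missing) != itinerary.count(0):
--         return "*"
--
--     def try_fill(step, allow_descent):
--         # Fused single pass: fill each 0 from the missing list (from the top when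
--         # step < 0, from the bottom otherwise) while checking the shape online
--         # (non-decreasing, then -- if allowed -- non-increasing), failing early.
--         j = len(missing) - 1 if step < 0 else 0
--         out, ascending = [], True
--         for x in itinerary:
--             if x == 0:
--                 x = missing[j]
--                 j += step
--             if out:
--                 if ascending:
--                     if x < out[-1]:
--                         if not allow_descent:
--                             return None
--                         ascending = False
--                 else:
--                     if x > out[-1]:
--                         return None
--             out.append(x)
--         return out
--
--     res = try_fill(-1, True)
--     if res is None:
--         res = try_fill(1, False)
--     return "*" if res is None else " ".join(map(str, res))
-- ===== Notes on version B (the rewrite author's own statement) =====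
-- stated objective: alternative
-- what changed: A builds each candidate list fully and then verifies it with max/first-index peak splitting plus whole-list sorted comparisons; B fuses filling and verification into one online single pass per scenario (an up-then-down state machine over the running last element with early exit), indexes one ascending missing list from either end instead of materialising a descending copy and its [::-1] reversal, and merges A's scenarios 1 and 2 into the single allow_descent scan.
import Mathlib
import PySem

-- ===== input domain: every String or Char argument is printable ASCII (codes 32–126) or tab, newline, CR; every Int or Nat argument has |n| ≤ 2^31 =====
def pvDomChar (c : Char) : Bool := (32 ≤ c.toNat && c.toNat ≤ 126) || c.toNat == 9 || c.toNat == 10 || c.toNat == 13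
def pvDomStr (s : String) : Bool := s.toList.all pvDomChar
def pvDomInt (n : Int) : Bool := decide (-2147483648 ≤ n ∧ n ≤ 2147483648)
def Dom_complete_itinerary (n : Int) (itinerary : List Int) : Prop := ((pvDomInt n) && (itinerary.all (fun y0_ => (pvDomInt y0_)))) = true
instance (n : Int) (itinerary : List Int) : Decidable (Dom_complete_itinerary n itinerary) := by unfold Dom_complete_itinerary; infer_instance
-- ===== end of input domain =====

-- B fuses filling and verification into one online pass per scenario (fill each gap from an
-- ascending missing list indexed from either end and check the up-then-down shape with a small
-- state machine, failing early), replacing A's build-then-verify with max/index/sorted checks;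
-- objective: alternative.

-- ===== PORT A =====
def complete_itinerary (n : Int) (itinerary : List Int) : String :=
  -- set(range(1, n+1)): the range is already distinct, so the Set is the range list itself
  -- (PySem.Set.ofList_eq_self_of_nodup, PySem.List.nodup_pyRange_one); Set.ofList would evaluate quadratically
  let all_stations : PySem.Set Int := PySem.List.pyRange 1 (n + 1) 1
  let given_stations := PySem.Set.diff (PySem.Set.ofList itinerary) (PySem.Set.ofList [0])
  -- sorted(..., reverse=True): Python's stable sort; List.mergeSort with (b ≤ a) computes the
  -- same list (pv_msort_desc below) and evaluates with logarithmic stack, where the insertion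
  -- sort would overflow the interpreter stack on a large n
  let missing_stations := List.mergeSort (PySem.Set.diff all_stations given_stations) (fun a b => decide (b ≤ a))
  if missing_stations.length ≠ PySem.List.count itinerary 0 then "*"
  else
    -- for-loop with (filled_itinerary, missing_index); under the length guard the index stays
    -- in range, so pyGetD's default 0 is never used (exact).
    let st := itinerary.foldl (fun (s : List Int × Nat) station =>
      if station = 0 then (s.1 ++ [PySem.List.pyGetD missing_stations (s.2 : Int) 0], s.2 + 1)
      else (s.1 ++ [station], s.2)) ([], 0)
    let filled_itinerary := st.1
    match PySem.List.max? filled_itinerary (fun x => x) with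
    | none => "*"  -- Python raises ValueError (max of empty sequence) here; Pre_ excludes it
    | some max_station =>
      -- max_station ∈ filled_itinerary, so index? is some and the default 0 is never used (exact)
      let peak_index := (PySem.List.index? filled_itinerary max_station).getD 0
      if PySem.List.slice filled_itinerary none (some (peak_index : Int)) =
           PySem.List.sorted (PySem.List.slice filled_itinerary none (some (peak_index : Int))) (fun x => x) false ∧
         PySem.List.slice filled_itinerary (some (peak_index : Int)) none =
           PySem.List.sorted (PySem.List.slice filled_itinerary (some (peak_index : Int)) none) (fun x => x) true then
        PySem.Str.join " " (filled_itinerary.map PySem.Int.toStr)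
      else if filled_itinerary = PySem.List.sorted filled_itinerary (fun x => x) true then
        PySem.Str.join " " (filled_itinerary.map PySem.Int.toStr)
      else
        let missing_stations_ver_2 := (PySem.List.slice? missing_stations none none (-1)).getD []  -- [::-1]; step ≠ 0, so some (exact)
        let st2 := itinerary.foldl (fun (s : List Int × Nat) station =>
          if station = 0 then (s.1 ++ [PySem.List.pyGetD missing_stations_ver_2 (s.2 : Int) 0], s.2 + 1)
          else (s.1 ++ [station], s.2)) ([], 0)
        if st2.1 = PySem.List.sorted st2.1 (fun x => x) false then
          PySem.Str.join " " (st2.1.map PySem.Int.toStr)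
        else "*"

-- ===== PORT B =====
-- try_fill(step, allow_descent): ONE fused pass, filling each 0 from `missing` at index j
-- (j from the top when step < 0, from the bottom otherwise) while checking the shape online:
-- state = (out, j, ascending); Python's early `return None` is the none-absorbing state.
-- `if out:` / `out[-1]` is out.getLast? (none = empty, no check yet).
def pvTryFill (itinerary missing : List Int) (step : Int) (allow_descent : Bool) :
    Option (List Int) :=
  let j0 : Int := if step < 0 then (missing.length : Int) - 1 else 0
  (itinerary.foldl (fun (st : Option (List Int × Int × Bool)) x =>
    match st with
    | none => none
    | some (out, j, ascending) =>
      let v := if x = 0 then PySem.List.pyGetD missing j 0 else x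
      let j' := if x = 0 then j + step else j
      match out.getLast? with
      | none => some (out ++ [v], j', ascending)
      | some p =>
        if ascending then
          if v < p then
            if !allow_descent then none
            else some (out ++ [v], j', false)
          else some (out ++ [v], j', ascending)
        else
          if p < v then none
          else some (out ++ [v], j', ascending)) (some ([], j0, true))).map (·.1)

def complete_itinerary_alt (n : Int) (itinerary : List Int) : String :=
  -- set(range(1, n+1)) is the (distinct) range list itself, as in port A
  -- sorted(...): stable sort; List.mergeSort with (a ≤ b) computes the same list
  -- (pv_msort_asc below), evaluating with logarithmic stack
  let missing := List.mergeSort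
    (PySem.Set.diff (PySem.List.pyRange 1 (n + 1) 1 : PySem.Set Int) (PySem.Set.ofList itinerary))
    (fun a b => decide (a ≤ b))
  if missing.length ≠ PySem.List.count itinerary 0 then "*"
  else
    let res := match pvTryFill itinerary missing (-1) true with
      | some r => some r
      | none => pvTryFill itinerary missing 1 false
    match res with
    | none => "*"
    | some r => PySem.Str.join " " (r.map PySem.Int.toStr)

-- ===== PRECONDITION & SPEC =====
-- Pre_ excludes exactly the inputs where A raises ValueError: empty itinerary together with
-- n ≤ 0 (then max() is taken of an empty list).
def Pre_complete_itinerary (n : Int) (itinerary : List Int) : Prop := ¬(itinerary = [] ∧ n ≤ 0)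
instance (n : Int) (itinerary : List Int) : Decidable (Pre_complete_itinerary n itinerary) := by unfold Pre_complete_itinerary; infer_instance
def pvWitness_complete_itinerary : Int × List Int := (3, [1, 0, 3])

def Spec_complete_itinerary (n : Int) (itinerary : List Int) (out : String) : Prop := out = complete_itinerary_alt n itinerary
instance (n : Int) (itinerary : List Int) (out : String) : Decidable (Spec_complete_itinerary n itinerary out) := by unfold Spec_complete_itinerary; infer_instance

-- ===== CLAIM (what is proved, stated in full; the proofs are below) =====
def Claim_equal_complete_itinerary : Prop := ∀ (n : Int) (itinerary : List Int), Dom_complete_itinerary n itinerary → Pre_complete_itinerary n itinerary → Spec_complete_itinerary n itinerary (complete_itinerary n itinerary)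

-- ===== LEMMAS AND PROOFS =====

-- the ports' mergeSort calls ARE Python's sorted: same stable result as PySem.List.sorted
lemma pv_msort_asc (xs : List Int) :
    List.mergeSort xs (fun a b => decide (a ≤ b)) = PySem.List.sorted xs (fun x => x) false := by
  refine List.Perm.eq_of_pairwise (le := fun a b : Int => a ≤ b)
    (fun a b _ _ h1 h2 => le_antisymm h1 h2) ?_ ?_
    ((List.mergeSort_perm xs _).trans (PySem.List.sorted_perm xs (fun x => x) false).symm)
  · have h := List.pairwise_mergeSort (le := fun a b : Int => decide (a ≤ b))
      (fun a b c => by simp_all; omega) (fun a b => by simp; omega) xs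
    exact List.Pairwise.imp (fun h => by simpa using h) h
  · exact PySem.List.sorted_pairwise xs (fun x => x)

lemma pv_msort_desc (xs : List Int) :
    List.mergeSort xs (fun a b => decide (b ≤ a)) = PySem.List.sorted xs (fun x => x) true := by
  refine List.Perm.eq_of_pairwise (le := fun a b : Int => b ≤ a)
    (fun a b _ _ h1 h2 => le_antisymm h2 h1) ?_ ?_
    ((List.mergeSort_perm xs _).trans (PySem.List.sorted_perm xs (fun x => x) true).symm)
  · have h := List.pairwise_mergeSort (le := fun a b : Int => decide (b ≤ a))
      (fun a b c => by simp_all; omega) (fun a b => by simp; omega) xs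
    exact List.Pairwise.imp (fun h => by simpa using h) h
  · exact PySem.List.sorted_pairwise_rev xs (fun x => x)

-- A's filled list, recursively (proof-side view of both fill loops)
def pvFillL : List Int → List Int → List Int
  | [], _ => []
  | x :: t, rem =>
    (if x = 0 then rem.headD 0 else x) :: pvFillL t (if x = 0 then rem.tail else rem)

-- B's scan verdict, recursively (proof-side view of the online check)
def pvScanOK (allow : Bool) : Bool → Int → List Int → Bool
  | _, _, [] => true
  | true, p, x :: t =>
    if x < p then allow && pvScanOK allow false x t else pvScanOK allow true x t
  | false, p, x :: t =>
    if p < x then false else pvScanOK allow false x t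

-- unimodality via adjacent pairs (specification mediating between the two ports)
def pvIsMountain (seq : List Int) : Bool :=
  ((seq.zip seq.tail).dropWhile (fun p => decide (p.1 ≤ p.2))).dropWhile (fun p => decide (p.1 ≥ p.2)) = []

def pvWM (xs : List Int) (k : Nat) : Prop :=
  ∀ i (h : i + 1 < xs.length),
    (i < k → (xs[i]'(Nat.lt_of_succ_lt h)) ≤ xs[i + 1]'h) ∧
    (k ≤ i → (xs[i + 1]'h) ≤ xs[i]'(Nat.lt_of_succ_lt h))

lemma pv_pairs_length (xs : List Int) : (xs.zip xs.tail).length = xs.length - 1 := by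
  simp [List.length_zip]

lemma pv_pairs_getElem (xs : List Int) (i : Nat) (h : i + 1 < xs.length) :
    (xs.zip xs.tail)[i]'(by rw [pv_pairs_length]; omega) = (xs[i]'(Nat.lt_of_succ_lt h), xs[i + 1]'h) := by
  rw [List.getElem_zip, List.getElem_tail]

lemma pv_mem_pairs (xs : List Int) (x : Int × Int) (hx : x ∈ xs.zip xs.tail) :
    ∃ i, ∃ (h : i + 1 < xs.length), x = (xs[i]'(Nat.lt_of_succ_lt h), xs[i + 1]'h) := by
  obtain ⟨i, hlen, rfl⟩ := List.mem_iff_getElem.1 hx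
  have hi : i + 1 < xs.length := by rw [pv_pairs_length] at hlen; omega
  exact ⟨i, hi, (pv_pairs_getElem xs i hi).symm ▸ rfl⟩

lemma pv_isMountain_iff (xs : List Int) :
    pvIsMountain xs = true ↔ ∃ k : Nat, pvWM xs k := by
  unfold pvIsMountain
  rw [decide_eq_true_iff, List.dropWhile_eq_nil_iff]
  set P := xs.zip xs.tail with hP
  set L : Int × Int → Bool := fun p => decide (p.1 ≤ p.2) with hL
  set G : Int × Int → Bool := fun p => decide (p.1 ≥ p.2) with hG
  constructor
  · intro h
    refine ⟨(P.takeWhile L).length, ?_⟩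
    have htake : P.take (P.takeWhile L).length = P.takeWhile L :=
      (List.prefix_iff_eq_take.1 (List.takeWhile_prefix L)).symm
    have hdrop : P.drop (P.takeWhile L).length = P.dropWhile L := by
      apply List.append_cancel_left (as := P.takeWhile L)
      have h0 := List.take_append_drop (P.takeWhile L).length P
      rw [htake] at h0
      rw [h0, List.takeWhile_append_dropWhile]
    intro i hi
    constructor
    · intro hik
      have hmem : P[i]'(by rw [pv_pairs_length]; omega) ∈ P.takeWhile L := by
        rw [← htake]
        have hkP : (P.takeWhile L).length ≤ P.length := (List.takeWhile_prefix L).length_le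
        refine List.mem_iff_getElem.2 ⟨i, by simp only [List.length_take]; omega, ?_⟩
        rw [List.getElem_take]
      have := List.mem_takeWhile_imp hmem
      rw [pv_pairs_getElem xs i hi] at this
      exact of_decide_eq_true this
    · intro hki
      have hmem : P[i]'(by rw [pv_pairs_length]; omega) ∈ P.dropWhile L := by
        rw [← hdrop]
        refine List.mem_iff_getElem.2 ⟨i - (P.takeWhile L).length, by rw [List.length_drop, pv_pairs_length]; omega, ?_⟩
        rw [List.getElem_drop]
        congr 1
        omega
      have := h _ hmem
      rw [pv_pairs_getElem xs i hi] at this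
      exact of_decide_eq_true this
  · rintro ⟨k, hk⟩
    intro x hx
    have hsplit : P = P.take k ++ P.drop k := (List.take_append_drop k P).symm
    have hTakeNil : (P.take k).dropWhile L = [] := by
      rw [List.dropWhile_eq_nil_iff]
      intro y hy
      obtain ⟨i, hil, rfl⟩ := List.mem_iff_getElem.1 hy
      have hi : i + 1 < xs.length := by
        rw [List.length_take, pv_pairs_length] at hil; omega
      rw [List.getElem_take, pv_pairs_getElem xs i hi]
      exact decide_eq_true ((hk i hi).1 (by rw [List.length_take] at hil; omega))
    have : P.dropWhile L = (P.drop k).dropWhile L := by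
      conv_lhs => rw [hsplit]
      rw [List.dropWhile_append, hTakeNil]
      simp
    rw [this] at hx
    have hx' : x ∈ P.drop k := (List.dropWhile_sublist L).mem hx
    obtain ⟨j, hjl, rfl⟩ := List.mem_iff_getElem.1 hx'
    have hj : (k + j) + 1 < xs.length := by
      rw [List.length_drop, pv_pairs_length] at hjl; omega
    rw [List.getElem_drop, pv_pairs_getElem xs (k + j) hj]
    exact decide_eq_true ((hk (k + j) hj).2 (by omega))

lemma pv_up_chain (xs : List Int) (k : Nat) (h : pvWM xs k) :
    ∀ i j (hij : i ≤ j) (_ : j ≤ k) (hj : j < xs.length), xs[i]'(by omega) ≤ xs[j]'hj := by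
  intro i j hij
  induction j, hij using Nat.le_induction with
  | base => intro _ hj; exact le_refl _
  | succ j hij ih =>
    intro hk hlen
    exact le_trans (ih (by omega) (by omega)) ((h j (by omega)).1 (by omega))

lemma pv_down_chain (xs : List Int) (k : Nat) (h : pvWM xs k) :
    ∀ i j (_ : k ≤ i) (hij : i ≤ j) (hj : j < xs.length), xs[j]'hj ≤ xs[i]'(by omega) := by
  intro i j hki hij
  induction j, hij using Nat.le_induction with
  | base => intro hj; exact le_refl _
  | succ j hij ih =>
    intro hlen
    exact le_trans ((h j (by omega)).2 (by omega)) (ih (by omega))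

lemma pv_scenario1_iff (xs : List Int) (m : Int) (hm : PySem.List.max? xs (fun x => x) = some m)
    (p : Nat) (hp : PySem.List.index? xs m = some p) :
    ((xs.take p).Pairwise (· ≤ ·) ∧ (xs.drop p).Pairwise (fun a b => b ≤ a)) ↔
      pvIsMountain xs = true := by
  obtain ⟨hplen, hxp, hfirst⟩ := PySem.List.getElem_of_index?_eq_some hp
  have hmax : ∀ y ∈ xs, y ≤ m := PySem.List.max?_isMax hm
  rw [pv_isMountain_iff]
  rw [← List.isChain_iff_pairwise, ← List.isChain_iff_pairwise,
      List.isChain_iff_getElem, List.isChain_iff_getElem]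
  constructor
  · rintro ⟨h1, h2⟩
    refine ⟨p, ?_⟩
    intro i hi
    constructor
    · intro hik
      by_cases hics : i + 1 < p
      · have := h1 i (by rw [List.length_take]; omega)
        simpa [List.getElem_take] using this
      · have hip : i + 1 = p := by omega
        have : xs[i]'(by omega) ≤ m := hmax _ (List.getElem_mem _)
        rw [← hxp] at this
        have hxe : xs[i + 1]'hi = xs[p]'hplen := by congr 1
        rw [hxe]
        exact this
    · intro hpi
      have := h2 (i - p) (by rw [List.length_drop]; omega)
      rw [List.getElem_drop, List.getElem_drop] at this
      have e1 : p + (i - p) = i := by omega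
      have e2 : p + (i - p + 1) = i + 1 := by omega
      simp only [e1, e2] at this
      exact this
  · rintro ⟨k, hk⟩
    have hpk : p ≤ k := by
      by_contra hlt
      rw [not_le] at hlt
      have hxkm : xs[k]'(by omega) = m := by
        have h1 : xs[p]'hplen ≤ xs[k]'(by omega) := pv_down_chain xs k hk k p (le_refl _) (by omega) hplen
        have h2 : xs[k]'(by omega) ≤ m := hmax _ (List.getElem_mem _)
        rw [hxp] at h1
        omega
      exact hfirst k hlt hxkm
    constructor
    · intro i hi
      have hi1 : i + 1 < p := by rw [List.length_take] at hi; omega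
      simp only [List.getElem_take]
      exact (hk i (by omega)).1 (by omega)
    · intro i hi
      rw [List.length_drop] at hi
      simp only [List.getElem_drop]
      by_cases hki : k ≤ p + i
      · exact (hk (p + i) (by omega)).2 hki
      · have hup : xs[p]'hplen ≤ xs[p + i]'(by omega) :=
          pv_up_chain xs k hk p (p + i) (by omega) (by omega) (by omega)
        have hle : xs[p + i]'(by omega) ≤ m := hmax _ (List.getElem_mem _)
        have hem : xs[p + i]'(by omega) = m := by rw [hxp] at hup; omega
        calc xs[p + (i + 1)]'(by omega) ≤ m := hmax _ (List.getElem_mem _)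
          _ = xs[p + i]'(by omega) := hem.symm

lemma pv_desc_scenario1 (xs : List Int) (h : xs.Pairwise (fun a b => b ≤ a)) :
    pvIsMountain xs = true := by
  rw [pv_isMountain_iff]
  refine ⟨0, ?_⟩
  rw [← List.isChain_iff_pairwise, List.isChain_iff_getElem] at h
  intro i hi
  exact ⟨by omega, fun _ => h i hi⟩

lemma pv_sorted_asc_iff (xs : List Int) :
    xs = PySem.List.sorted xs (fun x => x) false ↔ xs.Pairwise (· ≤ ·) := by
  constructor
  · intro h
    have := PySem.List.sorted_pairwise xs (fun x => x)
    rwa [← h] at this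
  · intro h
    exact (PySem.List.sorted_eq_self_of_pairwise xs (fun x => x) h).symm

lemma pv_sorted_desc_iff (xs : List Int) :
    xs = PySem.List.sorted xs (fun x => x) true ↔ xs.Pairwise (fun a b => b ≤ a) := by
  constructor
  · intro h
    have := PySem.List.sorted_pairwise_rev xs (fun x => x)
    rwa [← h] at this
  · intro h
    exact (PySem.List.sorted_rev_eq_self_of_pairwise xs (fun x => x) h).symm

-- the two programs build the same missing-stations set (0 is never a station of 1..n)
lemma pv_missing_eq (n : Int) (itinerary : List Int) :
    PySem.Set.diff (PySem.List.pyRange 1 (n + 1) 1 : PySem.Set Int)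
      (PySem.Set.diff (PySem.Set.ofList itinerary) (PySem.Set.ofList [0])) =
    PySem.Set.diff (PySem.List.pyRange 1 (n + 1) 1 : PySem.Set Int) (PySem.Set.ofList itinerary) := by
  show List.filter _ _ = List.filter _ _
  apply List.filter_congr
  intro x hx
  have hx1 : 1 ≤ x := (PySem.List.mem_pyRange_one.1 hx).1
  have hiff : x ∈ PySem.Set.diff (PySem.Set.ofList itinerary) (PySem.Set.ofList [0]) ↔ x ∈ PySem.Set.ofList itinerary := by
    rw [PySem.Set.mem_diff]
    simp [PySem.Set.mem_ofList]
    omega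
  simp only [PySem.Set.contains_eq_listContains]
  by_cases hm : x ∈ PySem.Set.ofList itinerary
  · simp [hm, hiff.2 hm]
  · simp [hm]

-- A's descending missing list is the reverse of B's ascending one
lemma pv_sorted_rev_eq_reverse (D : List Int) (hD : D.Nodup) :
    PySem.List.sorted D (fun x => x) true = (PySem.List.sorted D (fun x => x) false).reverse := by
  have hperm : (PySem.List.sorted D (fun x => x) false).Perm D := PySem.List.sorted_perm D _ false
  have hle : (PySem.List.sorted D (fun x => x) false).Pairwise (· ≤ ·) :=
    PySem.List.sorted_pairwise D (fun x => x)
  have hnd : (PySem.List.sorted D (fun x => x) false).Nodup := hperm.nodup_iff.2 hD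
  have hlt : (PySem.List.sorted D (fun x => x) false).Pairwise (· < ·) :=
    (hle.and hnd).imp (fun h => lt_of_le_of_ne h.1 h.2)
  exact PySem.List.sorted_rev_eq_of_perm_of_pairwise_gt D
    ((PySem.List.sorted D (fun x => x) false).reverse) (fun x => x)
    ((List.reverse_perm _).trans hperm)
    (List.pairwise_reverse.2 hlt)

-- ===== the two fill loops compute pvFillL =====
lemma pv_getD_head (ms : List Int) (i : Nat) : PySem.List.pyGetD ms (i : Int) 0 = (ms.drop i).headD 0 := by
  rw [PySem.List.pyGetD_natCast]
  simp [List.getD_eq_getElem?_getD, List.headD_eq_head?_getD, List.head?_drop]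

lemma pv_fold_fill_aux (itinerary : List Int) (ms acc : List Int) (i : Nat) :
    (itinerary.foldl (fun (s : List Int × Nat) station =>
      if station = 0 then (s.1 ++ [PySem.List.pyGetD ms (s.2 : Int) 0], s.2 + 1)
      else (s.1 ++ [station], s.2)) (acc, i)).1 =
    acc ++ pvFillL itinerary (ms.drop i) := by
  induction itinerary generalizing acc i with
  | nil => simp [pvFillL]
  | cons a t ih =>
    simp only [List.foldl_cons, pvFillL]
    by_cases h : a = 0
    · rw [if_pos h, if_pos h, pv_getD_head ms i, ih]
      simp [h, List.tail_drop]
    · rw [if_neg h, if_neg h, ih]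
      simp [h]

-- ===== B's fold: index form → supply-list form =====
def pvStepL (allow : Bool) (st : Option (List Int × List Int × Bool)) (x : Int) :
    Option (List Int × List Int × Bool) :=
  match st with
  | none => none
  | some (out, rem, ascending) =>
    let v := if x = 0 then rem.headD 0 else x
    let rem' := if x = 0 then rem.tail else rem
    match out.getLast? with
    | none => some (out ++ [v], rem', ascending)
    | some p =>
      if ascending then
        if v < p then
          if !allow then none
          else some (out ++ [v], rem', false)
        else some (out ++ [v], rem', ascending)
      else
        if p < v then none
        else some (out ++ [v], rem', ascending)

-- the fold function of pvTryFill, named (definitionally the port's lambda)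
def pvStepIdx (missing : List Int) (step : Int) (allow : Bool)
    (st : Option (List Int × Int × Bool)) (x : Int) : Option (List Int × Int × Bool) :=
  match st with
  | none => none
  | some (out, j, ascending) =>
    let v := if x = 0 then PySem.List.pyGetD missing j 0 else x
    let j' := if x = 0 then j + step else j
    match out.getLast? with
    | none => some (out ++ [v], j', ascending)
    | some p =>
      if ascending then
        if v < p then
          if !allow then none
          else some (out ++ [v], j', false)
        else some (out ++ [v], j', ascending)
      else
        if p < v then none
        else some (out ++ [v], j', ascending)

lemma pv_tryFill_eq (it missing : List Int) (step : Int) (allow : Bool) :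
    pvTryFill it missing step allow =
      (it.foldl (pvStepIdx missing step allow)
        (some ([], (if step < 0 then (missing.length : Int) - 1 else 0), true))).map (·.1) := rfl

lemma pv_foldl_none {σ : Type} (F : Option σ → Int → Option σ)
    (hF : ∀ x, F none x = none) (it : List Int) : it.foldl F none = none := by
  induction it with
  | nil => rfl
  | cons a t ih => rw [List.foldl_cons, hF]; exact ih

-- one step of the index form and one step of the supply-list form move in lockstep
lemma pv_step_pair (missing : List Int) (step : Int) (allow : Bool) (x : Int)
    (out : List Int) (asc : Bool) (j : Int) (rem : List Int)
    (hv : (if x = 0 then PySem.List.pyGetD missing j 0 else x) =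
          (if x = 0 then rem.headD 0 else x)) :
    (pvStepIdx missing step allow (some (out, j, asc)) x = none ∧
       pvStepL allow (some (out, rem, asc)) x = none) ∨
    (∃ out' asc', pvStepIdx missing step allow (some (out, j, asc)) x =
         some (out', (if x = 0 then j + step else j), asc') ∧
       pvStepL allow (some (out, rem, asc)) x =
         some (out', (if x = 0 then rem.tail else rem), asc')) := by
  simp only [pvStepIdx, pvStepL, hv]
  cases hout : out.getLast? with
  | none => exact Or.inr ⟨_, _, rfl, rfl⟩
  | some p =>
    by_cases hasc : asc = true
    · subst hasc
      by_cases hvp : (if x = 0 then rem.headD 0 else x) < p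
      · by_cases hal : allow = true
        · subst hal
          simp only [if_pos hvp, Bool.not_true, Bool.false_eq_true, if_false]
          exact Or.inr ⟨_, _, rfl, rfl⟩
        · replace hal : allow = false := by revert hal; cases allow <;> simp
          subst hal
          simp only [if_pos hvp, Bool.not_false, if_true]
          exact Or.inl ⟨by trivial, by trivial⟩
      · simp only [if_neg hvp]
        exact Or.inr ⟨_, _, rfl, rfl⟩
    · replace hasc : asc = false := by revert hasc; cases asc <;> simp
      subst hasc
      by_cases hpv : p < (if x = 0 then rem.headD 0 else x)
      · simp only [if_pos hpv, Bool.false_eq_true, if_false]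
        exact Or.inl ⟨by trivial, by trivial⟩
      · simp only [if_neg hpv, Bool.false_eq_true, if_false]
        exact Or.inr ⟨_, _, rfl, rfl⟩

lemma pv_rev_head (ms : List Int) (z : Nat) (hz : z < ms.length) :
    (ms.reverse.drop z).headD 0 = (ms.drop (ms.length - 1 - z)).headD 0 := by
  simp [List.headD_eq_head?_getD, List.head?_drop, List.getElem?_reverse (by simpa using hz)]

-- down pass: index (len-1-z) stepping -1 consumes missing.reverse.drop z
lemma pv_idx_down (missing : List Int) (allow : Bool) (it : List Int) :
    ∀ (out : List Int) (asc : Bool) (z : Nat),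
      z + PySem.List.count it 0 ≤ missing.length →
      (it.foldl (pvStepIdx missing (-1) allow)
        (some (out, ((missing.length : Int) - 1 - z), asc))).map (·.1) =
      (it.foldl (pvStepL allow) (some (out, missing.reverse.drop z, asc))).map (·.1) := by
  induction it with
  | nil => intro out asc z _; rfl
  | cons x t ih =>
    intro out asc z hcnt
    have hcons : ∀ c : Int, PySem.List.count (c :: t) c = PySem.List.count t c + 1 := by
      intro c; simp [PySem.List.count]
    have hv : (if x = 0 then PySem.List.pyGetD missing ((missing.length : Int) - 1 - z) 0 else x) =
        (if x = 0 then (missing.reverse.drop z).headD 0 else x) := by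
      by_cases hx : x = 0
      · subst hx
        have hz : z < missing.length := by have := hcons 0; omega
        have hcast : ((missing.length : Int) - 1 - z) = ((missing.length - 1 - z : Nat) : Int) := by
          omega
        rw [if_pos rfl, if_pos rfl, hcast, pv_getD_head, pv_rev_head missing z hz]
      · simp [hx]
    rw [List.foldl_cons, List.foldl_cons]
    rcases pv_step_pair missing (-1) allow x out asc _ _ hv with ⟨hA, hB⟩ | ⟨out', asc', hA, hB⟩
    · rw [hA, hB, pv_foldl_none _ (fun _ => rfl), pv_foldl_none _ (fun _ => rfl)]
      rfl
    · rw [hA, hB]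
      by_cases hx : x = 0
      · subst hx
        have hcnt' : (z + 1) + PySem.List.count t 0 ≤ missing.length := by
          have := hcons 0; omega
        have hj : ((missing.length : Int) - 1 - z) + (-1) =
            (missing.length : Int) - 1 - (↑(z + 1) : Int) := by push_cast; ring
        have hrem : (missing.reverse.drop z).tail = missing.reverse.drop (z + 1) := by
          rw [List.tail_drop]
        simp only [hj, hrem]
        exact ih out' asc' (z + 1) hcnt'
      · have hcnt' : z + PySem.List.count t 0 ≤ missing.length := by
          have : PySem.List.count (x :: t) 0 = PySem.List.count t 0 := by
            simp [PySem.List.count, hx]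
          omega
        simp only [if_neg hx]
        exact ih out' asc' z hcnt'

-- up pass: index z stepping +1 consumes missing.drop z
lemma pv_idx_up (missing : List Int) (allow : Bool) (it : List Int) :
    ∀ (out : List Int) (asc : Bool) (z : Nat),
      (it.foldl (pvStepIdx missing 1 allow) (some (out, (z : Int), asc))).map (·.1) =
      (it.foldl (pvStepL allow) (some (out, missing.drop z, asc))).map (·.1) := by
  induction it with
  | nil => intro out asc z; rfl
  | cons x t ih =>
    intro out asc z
    have hv : (if x = 0 then PySem.List.pyGetD missing (z : Int) 0 else x) =
        (if x = 0 then (missing.drop z).headD 0 else x) := by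
      by_cases hx : x = 0
      · rw [if_pos hx, if_pos hx, pv_getD_head]
      · simp [hx]
    rw [List.foldl_cons, List.foldl_cons]
    rcases pv_step_pair missing 1 allow x out asc _ _ hv with ⟨hA, hB⟩ | ⟨out', asc', hA, hB⟩
    · rw [hA, hB, pv_foldl_none _ (fun _ => rfl), pv_foldl_none _ (fun _ => rfl)]
      rfl
    · rw [hA, hB]
      by_cases hx : x = 0
      · subst hx
        have hj : (z : Int) + 1 = ((z + 1 : Nat) : Int) := by push_cast; ring
        have hrem : (missing.drop z).tail = missing.drop (z + 1) := by rw [List.tail_drop]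
        simp only [hj, hrem]
        exact ih out' asc' (z + 1)
      · simp only [if_neg hx]
        exact ih out' asc' z

lemma pv_tryFill_down (it missing : List Int) (allow : Bool)
    (h : PySem.List.count it 0 ≤ missing.length) :
    pvTryFill it missing (-1) allow =
      (it.foldl (pvStepL allow) (some ([], missing.reverse, true))).map (·.1) := by
  rw [pv_tryFill_eq]
  have h0 : (if (-1 : Int) < 0 then (missing.length : Int) - 1 else 0) =
      (missing.length : Int) - 1 - ((0 : Nat) : Int) := by norm_num
  rw [h0, pv_idx_down missing allow it [] true 0 (by simpa using h), List.drop_zero]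

lemma pv_tryFill_up (it missing : List Int) (allow : Bool) :
    pvTryFill it missing 1 allow =
      (it.foldl (pvStepL allow) (some ([], missing, true))).map (·.1) := by
  rw [pv_tryFill_eq]
  have h0 : (if (1 : Int) < 0 then (missing.length : Int) - 1 else 0) = ((0 : Nat) : Int) := by
    norm_num
  rw [h0, pv_idx_up missing allow it [] true 0, List.drop_zero]

-- supply-list form of B's fold computes pvFillL, guarded by pvScanOK
lemma pv_stepL_run (allow : Bool) (it : List Int) :
    ∀ (rem out : List Int) (p : Int) (asc : Bool), out.getLast? = some p →
      (it.foldl (pvStepL allow) (some (out, rem, asc))).map (·.1) =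
        (if pvScanOK allow asc p (pvFillL it rem) then some (out ++ pvFillL it rem) else none) := by
  induction it with
  | nil => intro rem out p asc _; simp [pvScanOK, pvFillL]
  | cons x t ih =>
    intro rem out p asc hlast
    rw [List.foldl_cons]
    set v := if x = 0 then rem.headD 0 else x with hv
    set rem' := if x = 0 then rem.tail else rem with hrem'
    have hfill : pvFillL (x :: t) rem = v :: pvFillL t rem' := rfl
    have hlast' : (out ++ [v]).getLast? = some v := by simp
    by_cases hasc : asc = true
    · subst hasc
      by_cases hvp : v < p
      · by_cases hal : allow = true
        · subst hal
          have hstep : pvStepL true (some (out, rem, true)) x = some (out ++ [v], rem', false) := by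
            simp only [pvStepL, hlast]
            rw [← hv, ← hrem']
            simp [hvp]
          rw [hstep, ih rem' (out ++ [v]) v false hlast', hfill]
          simp [pvScanOK, hvp]
        · replace hal : allow = false := by revert hal; cases allow <;> simp
          subst hal
          have hstep : pvStepL false (some (out, rem, true)) x = none := by
            simp only [pvStepL, hlast]
            rw [← hv]
            simp [hvp]
          rw [hstep, pv_foldl_none _ (fun _ => rfl), hfill]
          simp [pvScanOK, hvp]
      · have hstep : pvStepL allow (some (out, rem, true)) x = some (out ++ [v], rem', true) := by
          simp only [pvStepL, hlast]
          rw [← hv, ← hrem']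
          simp [hvp]
        rw [hstep, ih rem' (out ++ [v]) v true hlast', hfill]
        simp [pvScanOK, hvp]
    · replace hasc : asc = false := by revert hasc; cases asc <;> simp
      subst hasc
      by_cases hpv : p < v
      · have hstep : pvStepL allow (some (out, rem, false)) x = none := by
          simp only [pvStepL, hlast]
          rw [← hv]
          simp [hpv]
        rw [hstep, pv_foldl_none _ (fun _ => rfl), hfill]
        simp [pvScanOK, hpv]
      · have hstep : pvStepL allow (some (out, rem, false)) x = some (out ++ [v], rem', false) := by
          simp only [pvStepL, hlast]
          rw [← hv, ← hrem']
          simp [hpv]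
        rw [hstep, ih rem' (out ++ [v]) v false hlast', hfill]
        simp [pvScanOK, hpv]

-- ===== the scan verdict is unimodality / monotonicity =====
lemma pv_mountain_single (p : Int) : pvIsMountain [p] = true := by
  simp [pvIsMountain]

lemma pv_mountain_cons_le {p x : Int} (t : List Int) (h : p ≤ x) :
    pvIsMountain (p :: x :: t) = pvIsMountain (x :: t) := by
  simp only [pvIsMountain, List.tail_cons, List.zip_cons_cons]
  rw [decide_eq_decide]
  rw [List.dropWhile_cons_of_pos (by simpa using h)]

lemma pv_all_zip_ge_iff (xs : List Int) :
    ((xs.zip xs.tail).all (fun q => decide (q.2 ≤ q.1)) = true) ↔ xs.Pairwise (fun a b => b ≤ a) := by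
  rw [List.all_eq_true, ← List.isChain_iff_pairwise, List.isChain_iff_getElem]
  constructor
  · intro h i hi
    have hmem : ((xs[i]'(Nat.lt_of_succ_lt hi), xs[i + 1]'hi) : Int × Int) ∈ xs.zip xs.tail := by
      refine List.mem_iff_getElem.2 ⟨i, by rw [pv_pairs_length]; omega, ?_⟩
      rw [pv_pairs_getElem xs i hi]
    exact of_decide_eq_true (h _ hmem)
  · intro h x hx
    obtain ⟨i, hi, rfl⟩ := pv_mem_pairs xs x hx
    exact decide_eq_true (h i hi)

lemma pv_mountain_cons_gt {p x : Int} (t : List Int) (h : x < p) :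
    (pvIsMountain (p :: x :: t) = true) ↔ (x :: t).Pairwise (fun a b => b ≤ a) := by
  rw [← pv_all_zip_ge_iff]
  simp only [pvIsMountain, List.tail_cons, List.zip_cons_cons]
  rw [decide_eq_true_iff]
  rw [List.dropWhile_cons_of_neg (by simp; omega),
      List.dropWhile_cons_of_pos (by simp [ge_iff_le]; omega)]
  rw [List.dropWhile_eq_nil_iff, List.all_eq_true]

lemma pv_scan_false_iff (allow : Bool) (p : Int) (xs : List Int) :
    pvScanOK allow false p xs = true ↔ (p :: xs).Pairwise (fun a b => b ≤ a) := by
  induction xs generalizing p with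
  | nil => simp [pvScanOK]
  | cons x t ih =>
    simp only [pvScanOK]
    by_cases hpx : p < x
    · simp only [hpx, reduceIte]
      rw [← List.isChain_iff_pairwise]
      simp [List.isChain_cons_cons]
      intro h; omega
    · simp only [hpx, reduceIte]
      rw [ih x]
      rw [← List.isChain_iff_pairwise, ← List.isChain_iff_pairwise]
      rw [List.isChain_cons_cons (l := t)]
      constructor
      · intro h; exact ⟨by omega, h⟩
      · exact And.right

lemma pv_scan_mountain_iff (p : Int) (xs : List Int) :
    pvScanOK true true p xs = true ↔ pvIsMountain (p :: xs) = true := by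
  induction xs generalizing p with
  | nil => simp [pvScanOK, pv_mountain_single]
  | cons x t ih =>
    simp only [pvScanOK]
    by_cases hxp : x < p
    · simp only [hxp, reduceIte, Bool.true_and]
      rw [pv_scan_false_iff, pv_mountain_cons_gt t hxp]
    · simp only [hxp, reduceIte]
      rw [ih x, pv_mountain_cons_le t (by omega)]

lemma pv_scan_asc_iff (p : Int) (xs : List Int) :
    pvScanOK false true p xs = true ↔ (p :: xs).Pairwise (· ≤ ·) := by
  induction xs generalizing p with
  | nil => simp [pvScanOK]
  | cons x t ih =>
    simp only [pvScanOK]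
    by_cases hxp : x < p
    · simp only [hxp, reduceIte, Bool.false_and]
      rw [← List.isChain_iff_pairwise]
      simp [List.isChain_cons_cons]
      intro h; omega
    · simp only [hxp, reduceIte]
      rw [ih x]
      rw [← List.isChain_iff_pairwise, ← List.isChain_iff_pairwise]
      rw [List.isChain_cons_cons (l := t)]
      constructor
      · intro h; exact ⟨by omega, h⟩
      · exact And.right

-- B's whole pass on a nonempty itinerary: first element is always taken, then the scan runs
lemma pv_run_from_start (allow : Bool) (a : Int) (t supply : List Int) :
    (((a :: t).foldl (pvStepL allow) (some ([], supply, true))).map (·.1)) =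
      (if pvScanOK allow true (if a = 0 then supply.headD 0 else a)
          (pvFillL t (if a = 0 then supply.tail else supply))
       then some (pvFillL (a :: t) supply) else none) := by
  rw [List.foldl_cons]
  have hstep0 : pvStepL allow (some ([], supply, true)) a =
      some ([(if a = 0 then supply.headD 0 else a)],
        (if a = 0 then supply.tail else supply), true) := by
    simp [pvStepL]
  rw [hstep0,
    pv_stepL_run allow t (if a = 0 then supply.tail else supply)
      [(if a = 0 then supply.headD 0 else a)] (if a = 0 then supply.headD 0 else a) true rfl]
  rfl

-- ===== VERDICT (by name: the statement is the Claim_ definition above) =====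
theorem complete_itinerary_spec : Claim_equal_complete_itinerary := by
  intro n it _ hpre
  unfold Spec_complete_itinerary
  simp only [complete_itinerary, complete_itinerary_alt]
  rw [pv_msort_desc, pv_msort_asc, pv_missing_eq]
  have hDnd : (PySem.Set.diff (PySem.List.pyRange 1 (n + 1) 1 : PySem.Set Int)
      (PySem.Set.ofList it)).Nodup :=
    PySem.Set.nodup_diff _ _ (PySem.List.nodup_pyRange_one 1 (n + 1))
  rw [pv_sorted_rev_eq_reverse _ hDnd]
  set MB := PySem.List.sorted
    (PySem.Set.diff (PySem.List.pyRange 1 (n + 1) 1 : PySem.Set Int) (PySem.Set.ofList it))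
    (fun x => x) false with hMBdef
  simp only [List.length_reverse]
  by_cases hg : MB.length ≠ PySem.List.count it 0
  · rw [if_pos hg, if_pos hg]
  · rw [if_neg hg, if_neg hg]
    have hgl : MB.length = PySem.List.count it 0 := not_ne_iff.mp hg
    rw [pv_fold_fill_aux it MB.reverse [] 0]
    simp only [List.drop_zero, List.nil_append]
    have hcle : PySem.List.count it 0 ≤ MB.length := le_of_eq hgl.symm
    rw [pv_tryFill_down it MB true hcle]
    cases it with
    | nil =>
      exfalso
      have hD : PySem.Set.diff (PySem.List.pyRange 1 (n + 1) 1 : PySem.Set Int)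
          (PySem.Set.ofList ([] : List Int)) = PySem.List.pyRange 1 (n + 1) 1 := by
        rw [PySem.Set.ofList_nil]
        show List.filter _ _ = _
        simp
      have hlen : MB.length = (n + 1 - 1).toNat := by
        rw [hMBdef, hD, PySem.List.length_sorted, PySem.List.length_pyRange_one]
      have hcnt0 : PySem.List.count ([] : List Int) 0 = 0 := rfl
      rw [hcnt0] at hgl
      exact hpre ⟨rfl, by omega⟩
    | cons a t =>
      rw [pv_run_from_start true a t MB.reverse]
      set rem0 : List Int := if a = 0 then MB.reverse.tail else MB.reverse with hrem0
      set v0 : Int := if a = 0 then MB.reverse.headD 0 else a with hv0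
      have hfc : pvFillL (a :: t) MB.reverse = v0 :: pvFillL t rem0 := rfl
      cases hmx : PySem.List.max? (pvFillL (a :: t) MB.reverse) (fun x => x) with
      | none =>
        exact absurd ((PySem.List.max?_eq_none_iff _ _).1 hmx) (by rw [hfc]; simp)
      | some m =>
        have hmem : m ∈ pvFillL (a :: t) MB.reverse := PySem.List.max?_mem hmx
        obtain ⟨p, hp⟩ : ∃ p, PySem.List.index? (pvFillL (a :: t) MB.reverse) m = some p :=
          Option.isSome_iff_exists.1 ((PySem.List.index?_isSome_iff _ _).2 hmem)
        dsimp only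
        rw [hp]
        simp only [Option.getD_some]
        simp only [PySem.List.slice_to_natCast, PySem.List.slice_from_natCast]
        have hiff := pv_scenario1_iff (pvFillL (a :: t) MB.reverse) m hmx p hp
        have hmiff : pvScanOK true true v0 (pvFillL t rem0) = true ↔
            pvIsMountain (pvFillL (a :: t) MB.reverse) = true := by
          rw [pv_scan_mountain_iff, hfc]
        by_cases hmt : pvIsMountain (pvFillL (a :: t) MB.reverse) = true
        · have hC1 : (pvFillL (a :: t) MB.reverse).take p =
              PySem.List.sorted ((pvFillL (a :: t) MB.reverse).take p) (fun x => x) false ∧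
              (pvFillL (a :: t) MB.reverse).drop p =
              PySem.List.sorted ((pvFillL (a :: t) MB.reverse).drop p) (fun x => x) true := by
            obtain ⟨h1, h2⟩ := hiff.2 hmt
            exact ⟨(pv_sorted_asc_iff _).2 h1, (pv_sorted_desc_iff _).2 h2⟩
          rw [if_pos hC1, if_pos (hmiff.2 hmt)]
        · have hC1 : ¬((pvFillL (a :: t) MB.reverse).take p =
              PySem.List.sorted ((pvFillL (a :: t) MB.reverse).take p) (fun x => x) false ∧
              (pvFillL (a :: t) MB.reverse).drop p =
              PySem.List.sorted ((pvFillL (a :: t) MB.reverse).drop p) (fun x => x) true) := by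
            rintro ⟨h1, h2⟩
            exact hmt (hiff.1 ⟨(pv_sorted_asc_iff _).1 h1, (pv_sorted_desc_iff _).1 h2⟩)
          rw [if_neg hC1]
          have hS2 : ¬(pvFillL (a :: t) MB.reverse =
              PySem.List.sorted (pvFillL (a :: t) MB.reverse) (fun x => x) true) := by
            intro h2
            exact hmt (pv_desc_scenario1 _ ((pv_sorted_desc_iff _).1 h2))
          rw [if_neg hS2]
          have hscanF : ¬(pvScanOK true true v0 (pvFillL t rem0) = true) := fun h => hmt (hmiff.1 h)
          rw [if_neg hscanF]
          -- A's second fill consumes MB; so does B's up pass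
          rw [PySem.List.slice?_none_none_neg_one]
          simp only [Option.getD_some, List.reverse_reverse]
          rw [pv_fold_fill_aux (a :: t) MB [] 0]
          simp only [List.drop_zero, List.nil_append]
          rw [pv_tryFill_up (a :: t) MB false, pv_run_from_start false a t MB]
          set rem1 : List Int := if a = 0 then MB.tail else MB with hrem1
          set v1 : Int := if a = 0 then MB.headD 0 else a with hv1
          have hfc1 : pvFillL (a :: t) MB = v1 :: pvFillL t rem1 := rfl
          have hupiff : pvScanOK false true v1 (pvFillL t rem1) = true ↔
              (pvFillL (a :: t) MB).Pairwise (· ≤ ·) := by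
            rw [pv_scan_asc_iff, hfc1]
          by_cases hup : pvFillL (a :: t) MB =
              PySem.List.sorted (pvFillL (a :: t) MB) (fun x => x) false
          · rw [if_pos hup, if_pos (hupiff.2 ((pv_sorted_asc_iff _).1 hup))]
          · rw [if_neg hup, if_neg (fun h => hup ((pv_sorted_asc_iff _).2 (hupiff.1 h)))]
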